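-- pv_equiv track=rewrite | github.com/Akhilon-MKS/-Automatic-code-review-system | command_analyzer.py | _generate_corrected_code
-- ===== SOURCE A (Python) =====
-- def _generate_corrected_code(command):
--     """Generate corrected version of Python code"""
--     corrected_code = command
--
--     # Apply basic corrections
--     lines = corrected_code.split('\n')
--     corrected_lines = []
--
--     for i, line in enumerate(lines):
--         corrected_lines.append(line)
--
--         # Check if this is a function/class definition without docstring
--         stripped = line.strip()
--         if stripped.startswith('def ') or stripped.startswith('class '):
--             # Check if next non-empty line is a docstring
--             has_docstring = False
--             for j in range(i + 1, len(lines)):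
--                 next_line = lines[j].strip()
--                 if next_line and not next_line.startswith(' ') and not next_line.startswith('\t'):
--                     break
--                 if next_line.startswith('"""') or next_line.startswith("'''"):
--                     has_docstring = True
--                     break
--
--             if not has_docstring:
--                 indent = len(line) - len(line.lstrip())
--                 corrected_lines.append(' ' * indent + '    """')
--                 if stripped.startswith('def '):
--                     corrected_lines.append(' ' * indent + '    Function description.')
--                 else:
--                     corrected_lines.append(' ' * indent + '    Class description.')
--                 corrected_lines.append(' ' * indent + '    """')
--
--     return '\n'.join(corrected_lines)
-- ===== SOURCE B (Python) =====
-- def _generate_corrected_code(command):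
--     def block(line):
--         s = line.strip()
--         if s.startswith('def ') or s.startswith('class '):
--             pad = ' ' * (len(line) - len(line.lstrip()))
--             desc = 'Function description.' if s.startswith('def ') else 'Class description.'
--             return [line, pad + '    """', pad + '    ' + desc, pad + '    """']
--         return [line]
--     return '\n'.join(out for line in command.split('\n') for out in block(line))
-- ===== Notes on version B (the rewrite author's own statement) =====
-- stated objective: simpler
-- what changed: A's nested structure (outer enumerate loop plus an inner forward scan over the remaining lines for an existing docstring, a scan that provably never succeeds because any stripped line hits the break first) is replaced by a single flat pass that expands each line into its block of one or four lines and joins once.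
import Mathlib
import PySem

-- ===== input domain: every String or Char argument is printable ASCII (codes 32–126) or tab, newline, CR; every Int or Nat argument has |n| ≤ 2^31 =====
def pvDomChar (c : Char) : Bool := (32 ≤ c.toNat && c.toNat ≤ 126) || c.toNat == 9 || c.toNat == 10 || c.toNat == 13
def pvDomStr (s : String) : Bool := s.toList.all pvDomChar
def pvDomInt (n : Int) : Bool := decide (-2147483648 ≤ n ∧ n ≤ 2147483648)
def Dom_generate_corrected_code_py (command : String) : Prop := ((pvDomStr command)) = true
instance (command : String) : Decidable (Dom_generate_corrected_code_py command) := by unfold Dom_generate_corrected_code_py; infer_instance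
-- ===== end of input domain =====

-- B replaces A's enumerate-plus-forward-scan loop (whose docstring scan never succeeds) with one flat
-- per-line expansion joined in a single pass; objective: simpler.


-- ===== PORT A =====
-- inner 'for j in range(i+1, len(lines))' loop of A, with its two breaks, over the index list
def docScanA (lines : List String) : List Int → Bool
  | [] => false
  | j :: rest =>
    let next_line := PySem.Str.strip (PySem.List.pyGetD lines j "")
    if next_line ≠ "" && !(PySem.Str.startswith next_line " ") && !(PySem.Str.startswith next_line "\t") then
      false
    else if PySem.Str.startswith next_line "\"\"\"" || PySem.Str.startswith next_line "'''" then
      true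
    else docScanA lines rest

-- one iteration of A's outer 'for i, line in enumerate(lines)' loop
def stepA (lines : List String) (acc : List String) (p : Int × String) : List String :=
  let i := p.1
  let line := p.2
  let acc := acc ++ [line]
  let stripped := PySem.Str.strip line
  if PySem.Str.startswith stripped "def " || PySem.Str.startswith stripped "class " then
    let has_docstring := docScanA lines (PySem.List.pyRange (i + 1) (PySem.List.len lines) 1)
    if !has_docstring then
      let indent := (PySem.Str.len line - PySem.Str.len (PySem.Str.lstrip line)).toNat
      let pad := String.ofList (List.replicate indent ' ')
      (acc ++ [pad ++ "    \"\"\""]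
           ++ [if PySem.Str.startswith stripped "def " then pad ++ "    Function description."
               else pad ++ "    Class description."]
           ++ [pad ++ "    \"\"\""])
    else acc
  else acc

def generate_corrected_code_py (command : String) : String :=
  let lines := (PySem.Str.split? command "\n").getD []
  let corrected_lines := (PySem.List.enumerate lines).foldl (stepA lines) []
  PySem.Str.join "\n" corrected_lines

-- ===== PORT B =====
def blockB (line : String) : List String :=
  let s := PySem.Str.strip line
  if PySem.Str.startswith s "def " || PySem.Str.startswith s "class " then
    let pad := String.ofList (List.replicate (PySem.Str.len line - PySem.Str.len (PySem.Str.lstrip line)).toNat ' ')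
    let desc := if PySem.Str.startswith s "def " then "Function description." else "Class description."
    [line, pad ++ "    \"\"\"", pad ++ "    " ++ desc, pad ++ "    \"\"\""]
  else [line]

def generate_corrected_code_py_alt (command : String) : String :=
  PySem.Str.join "\n" (((PySem.Str.split? command "\n").getD []).flatMap blockB)

-- ===== PRECONDITION & SPEC =====
def Spec_generate_corrected_code_py (command : String) (out : String) : Prop := out = generate_corrected_code_py_alt command
instance (command : String) (out : String) : Decidable (Spec_generate_corrected_code_py command out) := by unfold Spec_generate_corrected_code_py; infer_instance

-- ===== CLAIM (what is proved, stated in full; the proofs are below) =====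
def Claim_equal_generate_corrected_code_py : Prop := ∀ (command : String), Dom_generate_corrected_code_py command → Spec_generate_corrected_code_py command (generate_corrected_code_py command)

-- ===== LEMMAS AND PROOFS =====

-- a line that failed A's first break test (empty, or starting with space/tab after strip) cannot pass the quote test
lemma no_quote (n : String)
    (h : (decide (n ≠ "") && !(PySem.Str.startswith n " ") && !(PySem.Str.startswith n "\t")) = false) :
    (PySem.Str.startswith n "\"\"\"" || PySem.Str.startswith n "'''" ) = false := by
  simp only [PySem.Str.startswith_eq,
    (by decide : (" " : String).toList = [' ']),
    (by decide : ("\t" : String).toList = ['\t']),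
    (by decide : ("\"\"\"" : String).toList = ['\"', '\"', '\"']),
    (by decide : ("'''" : String).toList = ['\'', '\'', '\''])] at h ⊢
  rcases hl : n.toList with _ | ⟨c, t⟩
  · decide
  · have hne : n ≠ "" := fun he => by rw [he] at hl; simp at hl
    have hd : decide (n ≠ "") = true := by simp [hne]
    rw [hd, Bool.true_and, Bool.and_eq_false_iff] at h
    simp only [hl, Bool.not_eq_false'] at h
    have hc : c = ' ' ∨ c = '\t' := by
      rcases h with h | h <;> rw [PySem.Chars.startswith_iff] at h
      · exact Or.inl ((List.cons_prefix_cons.mp h).1).symm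
      · exact Or.inr ((List.cons_prefix_cons.mp h).1).symm
    rw [Bool.or_eq_false_iff]
    constructor <;>
    · rw [Bool.eq_false_iff]
      intro hq
      rw [PySem.Chars.startswith_iff] at hq
      have := (List.cons_prefix_cons.mp hq).1
      rcases hc with hc | hc <;> simp_all

-- A's forward scan never finds a docstring: any line passing the quote test already triggered the first break
lemma docScanA_false (lines : List String) (js : List Int) : docScanA lines js = false := by
  induction js with
  | nil => rfl
  | cons j rest ih =>
    simp only [docScanA]
    split
    · rfl
    · rename_i h1
      rw [Bool.not_eq_true] at h1
      rw [no_quote _ h1]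
      simpa using ih

-- each outer iteration of A appends exactly B's block for that line
lemma stepA_eq (lines : List String) (acc : List String) (p : Int × String) :
    stepA lines acc p = acc ++ blockB p.2 := by
  simp only [stepA, blockB, docScanA_false, Bool.not_false, if_true]
  split
  · have h4 : ("    " ++ "Function description." : String) = "    Function description." := by decide
    have h5 : ("    " ++ "Class description." : String) = "    Class description." := by decide
    split <;> simp [String.append_assoc, h4, h5]
  · simp

-- ===== VERDICT (by name: the statement is the Claim_ definition above) =====
theorem generate_corrected_code_py_spec : Claim_equal_generate_corrected_code_py := by
  intro command _
  show generate_corrected_code_py command = generate_corrected_code_py_alt command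
  unfold generate_corrected_code_py generate_corrected_code_py_alt
  set lines := (PySem.Str.split? command "\n").getD [] with hl
  show PySem.Str.join "\n" ((PySem.List.enumerate lines).foldl (stepA lines) []) =
    PySem.Str.join "\n" (lines.flatMap blockB)
  congr 1
  calc (PySem.List.enumerate lines).foldl (stepA lines) []
      = (PySem.List.enumerate lines).foldl (fun acc p => acc ++ blockB p.2) [] :=
        PySem.List.foldl_congr_mem _ _ _ _ (fun acc p _ => stepA_eq lines acc p)
    _ = [] ++ (PySem.List.enumerate lines).flatMap (fun p => blockB p.2) :=
        PySem.List.foldl_append_eq_flatMap _ _ _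
    _ = ((PySem.List.enumerate lines).map (·.2)).flatMap blockB := by
        rw [List.nil_append]; exact Eq.symm (List.flatMap_map _ _ _)
    _ = lines.flatMap blockB := by rw [PySem.List.map_snd_enumerate]
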